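-- pv_equiv track=rewrite | github.com/McGill-NLP/bias-bench | export/glue.py | _parse_experiment_id
-- ===== SOURCE A (Python) =====
-- def _parse_experiment_id(experiment_id):
--     model = None
--     model_name_or_path = None
--     bias_type = None
--
--     items = experiment_id.split("_")[1:]
--     for item in items:
--         id_, val = item[:1], item[2:]
--         if id_ == "m":
--             model = val
--         elif id_ == "c":
--             model_name_or_path = val
--         elif id_ == "t":
--             bias_type = val
--         else:
--             raise ValueError(f"Unrecognized ID {id_}.")
--
--     return model, model_name_or_path, bias_type
-- ===== SOURCE B (Python) =====
-- def _parse_experiment_id(experiment_id):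
--     items = experiment_id.split("_")[1:]
--     for item in items:
--         if item[:1] not in ("m", "c", "t"):
--             raise ValueError(f"Unrecognized ID {item[:1]}.")
--
--     def _last(letter):
--         for item in reversed(items):
--             if item[:1] == letter:
--                 return item[2:]
--         return None
--
--     return _last("m"), _last("c"), _last("t")
-- ===== Notes on version B (the rewrite author's own statement) =====
-- stated objective: alternative
-- what changed: Replaces A's single accumulating pass with three named variables by staged passes: one validation pass that raises at the first bad item, then for each field an independent back-to-front scan returning the last token with that id letter (equivalent because A's overwriting makes the last occurrence win).
import Mathlib
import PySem

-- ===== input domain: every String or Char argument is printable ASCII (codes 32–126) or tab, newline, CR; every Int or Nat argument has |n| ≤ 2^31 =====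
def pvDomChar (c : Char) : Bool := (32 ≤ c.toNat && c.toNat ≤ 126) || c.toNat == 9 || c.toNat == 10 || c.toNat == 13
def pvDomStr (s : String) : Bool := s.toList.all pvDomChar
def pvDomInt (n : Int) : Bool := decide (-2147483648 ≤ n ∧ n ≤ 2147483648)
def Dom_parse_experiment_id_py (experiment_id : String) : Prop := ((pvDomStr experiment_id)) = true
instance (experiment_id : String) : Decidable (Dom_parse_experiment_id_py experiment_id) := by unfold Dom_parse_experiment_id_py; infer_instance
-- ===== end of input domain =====

-- B replaces A's single accumulating pass (three mutable variables, if/elif) by staged passes: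
-- a validation pass, then one independent back-to-front scan per field (last occurrence wins,
-- as in A). Alternative decomposition; same return value wherever A returns.

-- ===== PORT A =====
-- A's for-loop over the three named variables; 'none' result = the ValueError branch
def pvAGo : List String → Option String × Option String × Option String →
    Option (Option String × Option String × Option String)
  | [], st => some st
  | item :: rest, (model, path, bias) =>
    let id_ := PySem.Str.slice item none (some 1)
    let val := PySem.Str.slice item (some 2) none
    if id_ = "m" then pvAGo rest (some val, path, bias)
    else if id_ = "c" then pvAGo rest (model, some val, bias)
    else if id_ = "t" then pvAGo rest (model, path, some val)
    else none

def parse_experiment_id_py (experiment_id : String) : Option String × Option String × Option String :=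
  (pvAGo (PySem.List.slice ((PySem.Str.split? experiment_id "_").getD []) (some 1) none)
    (none, none, none)).getD (none, none, none)

-- ===== PORT B =====
-- B's validation pass: false at the first item whose first letter is not m/c/t (= ValueError)
def pvBValid : List String → Bool
  | [] => true
  | item :: rest =>
    let id_ := PySem.Str.slice item none (some 1)
    if id_ = "m" ∨ id_ = "c" ∨ id_ = "t" then pvBValid rest else false

-- B's `_last`: the for-loop over reversed(items)
def pvBLastGo (letter : String) : List String → Option String
  | [] => none
  | item :: rest =>
    if PySem.Str.slice item none (some 1) = letter then some (PySem.Str.slice item (some 2) none)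
    else pvBLastGo letter rest

def pvBLast (letter : String) (items : List String) : Option String :=
  pvBLastGo letter items.reverse

def parse_experiment_id_py_alt (experiment_id : String) : Option String × Option String × Option String :=
  let items := PySem.List.slice ((PySem.Str.split? experiment_id "_").getD []) (some 1) none
  if pvBValid items then (pvBLast "m" items, pvBLast "c" items, pvBLast "t" items)
  else (none, none, none)

-- ===== PRECONDITION & SPEC =====
-- Pre_ excludes exactly the inputs on which A raises ValueError (an item whose first letter is not m/c/t; B raises there too).
def Pre_parse_experiment_id_py (experiment_id : String) : Prop :=
  ∀ item ∈ PySem.List.slice ((PySem.Str.split? experiment_id "_").getD []) (some 1) none,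
    PySem.Str.slice item none (some 1) ∈ (["m", "c", "t"] : List String)
instance (experiment_id : String) : Decidable (Pre_parse_experiment_id_py experiment_id) := by unfold Pre_parse_experiment_id_py; infer_instance

def pvWitness_parse_experiment_id_py : String := "glue_m-Bert_c-bert-base_t-gender"

def Spec_parse_experiment_id_py (experiment_id : String) (out : Option String × Option String × Option String) : Prop := out = parse_experiment_id_py_alt experiment_id
instance (experiment_id : String) (out : Option String × Option String × Option String) : Decidable (Spec_parse_experiment_id_py experiment_id out) := by unfold Spec_parse_experiment_id_py; infer_instance

-- ===== CLAIM (what is proved, stated in full; the proofs are below) =====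
def Claim_equal_parse_experiment_id_py : Prop := ∀ (experiment_id : String), Dom_parse_experiment_id_py experiment_id → Pre_parse_experiment_id_py experiment_id → Spec_parse_experiment_id_py experiment_id (parse_experiment_id_py experiment_id)

-- ===== LEMMAS AND PROOFS =====
lemma pvBLastGo_append (letter : String) (xs : List String) (x : String) :
    pvBLastGo letter (xs ++ [x]) =
      (pvBLastGo letter xs).or
        (if PySem.Str.slice x none (some 1) = letter then some (PySem.Str.slice x (some 2) none) else none) := by
  induction xs with
  | nil => simp [pvBLastGo]
  | cons y ys ih => by_cases h : PySem.Str.slice y none (some 1) = letter <;> simp [pvBLastGo, h, ih]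

lemma pvBLast_cons (letter : String) (item : String) (rest : List String) :
    pvBLast letter (item :: rest) =
      (pvBLast letter rest).or
        (if PySem.Str.slice item none (some 1) = letter then some (PySem.Str.slice item (some 2) none) else none) := by
  simp [pvBLast, pvBLastGo_append]

lemma pvBValid_of_pre (items : List String)
    (h : ∀ item ∈ items, PySem.Str.slice item none (some 1) ∈ (["m", "c", "t"] : List String)) :
    pvBValid items = true := by
  induction items with
  | nil => rfl
  | cons item rest ih =>
    have hid := h item (by simp)
    simp only [List.mem_cons, List.not_mem_nil, or_false] at hid
    simp only [pvBValid]
    rw [if_pos hid]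
    exact ih fun it hit => h it (by simp [hit])

lemma pvGo_agree (items : List String)
    (h : ∀ item ∈ items, PySem.Str.slice item none (some 1) ∈ (["m", "c", "t"] : List String))
    (m c t : Option String) :
    pvAGo items (m, c, t) =
      some ((pvBLast "m" items).or m, (pvBLast "c" items).or c, (pvBLast "t" items).or t) := by
  induction items generalizing m c t with
  | nil => simp [pvAGo, pvBLast, pvBLastGo]
  | cons item rest ih =>
    have hid := h item (by simp)
    have hrest : ∀ it ∈ rest, PySem.Str.slice it none (some 1) ∈ (["m", "c", "t"] : List String) :=
      fun it hit => h it (by simp [hit])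
    simp only [List.mem_cons, List.not_mem_nil, or_false] at hid
    rcases hid with hid | hid | hid <;>
      simp [pvAGo, hid, ih hrest, pvBLast_cons]

-- ===== VERDICT (by name: the statement is the Claim_ definition above) =====
theorem parse_experiment_id_py_spec : Claim_equal_parse_experiment_id_py := by
  intro s _ hpre
  unfold Spec_parse_experiment_id_py parse_experiment_id_py parse_experiment_id_py_alt
  rw [pvGo_agree _ hpre none none none]
  simp [pvBValid_of_pre _ hpre]
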